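-- pv_equiv track=rewrite | github.com/GabrielRoggia/estatistica | tabela_classes.py | frequencia_absoluta
-- ===== SOURCE A (Python) =====
-- def frequencia_absoluta(dados, classes):
--     absoluta = []
--     count = 0
--
--     for i in range(len(classes)):
--         for j in range(len(dados)):
--             if dados[j] >= classes[i][0] and dados[j] < classes[i][1]:
--                 count += 1
--         absoluta.append(count)
--         count = 0
--
--     return absoluta
-- ===== SOURCE B (Python) =====
-- def _bisect_left(s, t):
--     lo, hi = 0, len(s)
--     while lo < hi:
--         mid = (lo + hi) // 2
--         if s[mid] < t:
--             lo = mid + 1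
--         else:
--             hi = mid
--     return lo
--
--
-- def frequencia_absoluta(dados, classes):
--     s = sorted(dados)
--     absoluta = []
--     for c in classes:
--         lo, hi = c[0], c[1]
--         if lo < hi:
--             absoluta.append(_bisect_left(s, hi) - _bisect_left(s, lo))
--         else:
--             absoluta.append(0)
--     return absoluta
-- ===== Notes on version B (the rewrite author's own statement) =====
-- stated objective: faster
-- what changed: Replaces the nested scan of all data for every class by sorting the data once and answering each class [lo,hi) with two hand-rolled binary searches (bisect_left(hi) - bisect_left(lo), 0 for an empty interval).
-- outside the precondition, e.g. on frequencia_absoluta([0, 0], [(1,)]): A returns [0], B raises IndexError; on frequencia_absoluta([], [(1,), ()]): A returns [0, 0], B raises IndexError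
import Mathlib
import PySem

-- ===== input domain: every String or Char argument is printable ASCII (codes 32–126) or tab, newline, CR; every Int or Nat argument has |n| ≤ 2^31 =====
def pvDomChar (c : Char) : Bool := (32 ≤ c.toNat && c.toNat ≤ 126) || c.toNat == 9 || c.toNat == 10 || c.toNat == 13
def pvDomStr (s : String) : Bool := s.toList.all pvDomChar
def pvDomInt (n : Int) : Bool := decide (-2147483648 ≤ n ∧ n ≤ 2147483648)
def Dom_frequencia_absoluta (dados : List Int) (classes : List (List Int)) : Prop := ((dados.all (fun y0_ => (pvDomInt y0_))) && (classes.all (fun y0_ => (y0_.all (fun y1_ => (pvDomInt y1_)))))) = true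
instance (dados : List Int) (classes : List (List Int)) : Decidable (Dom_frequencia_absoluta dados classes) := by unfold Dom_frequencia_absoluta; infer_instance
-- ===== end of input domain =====

-- B sorts the data once and answers each class interval [lo,hi) with two binary
-- searches instead of rescanning all data for every class (return value only).

-- ===== PORT A =====
def frequencia_absoluta (dados : List Int) (classes : List (List Int)) : List Int :=
  (PySem.List.pyRange 0 (PySem.List.len classes) 1).foldl
    (fun absoluta i =>
      let c := PySem.List.pyGetD classes i []
      let count : Int :=
        (PySem.List.pyRange 0 (PySem.List.len dados) 1).foldl
          (fun count j =>
            if PySem.List.pyGetD dados j 0 ≥ PySem.List.pyGetD c 0 0 ∧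
               PySem.List.pyGetD dados j 0 < PySem.List.pyGetD c 1 0
            then count + 1 else count) 0
      absoluta ++ [count]) []

-- ===== PORT B =====
-- hand-rolled bisect_left loop from Source B (while lo < hi, mid = (lo+hi)//2)
def pvBlLoop (s : List Int) (t : Int) (lo hi : Int) : Int :=
  if h : lo < hi then
    let mid := PySem.Int.floordiv (lo + hi) 2
    if PySem.List.pyGetD s mid 0 < t then pvBlLoop s t (mid + 1) hi
    else pvBlLoop s t lo mid
  else lo
termination_by (hi - lo).toNat
decreasing_by
  · have hb := PySem.Int.floordiv_two_mid_bounds (le_of_lt h)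
    have he : PySem.Int.floordiv (lo + hi) 2 = (lo + hi) / 2 :=
      PySem.Int.floordiv_eq_ediv_of_pos (by omega)
    rw [he] at hb ⊢; omega
  · have hb := PySem.Int.floordiv_two_mid_bounds (le_of_lt h)
    have he : PySem.Int.floordiv (lo + hi) 2 = (lo + hi) / 2 :=
      PySem.Int.floordiv_eq_ediv_of_pos (by omega)
    rw [he] at hb ⊢; omega

def pvBisectLeft (s : List Int) (t : Int) : Int :=
  pvBlLoop s t 0 (PySem.List.len s)

def frequencia_absoluta_alt (dados : List Int) (classes : List (List Int)) : List Int :=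
  let s := PySem.List.sorted dados (fun x => x) false
  classes.foldl
    (fun absoluta c =>
      let lo := PySem.List.pyGetD c 0 0
      let hi := PySem.List.pyGetD c 1 0
      absoluta ++ [if lo < hi then pvBisectLeft s hi - pvBisectLeft s lo else 0]) []

-- ===== PRECONDITION & SPEC =====
-- Pre_ excludes classes with fewer than 2 entries: there A usually raises IndexError, and where short-circuiting (or empty data) lets A still return zeros, B itself raises IndexError on c[0]/c[1].
def Pre_frequencia_absoluta (dados : List Int) (classes : List (List Int)) : Prop :=
  ∀ c ∈ classes, 2 ≤ c.length
instance (dados : List Int) (classes : List (List Int)) : Decidable (Pre_frequencia_absoluta dados classes) := by unfold Pre_frequencia_absoluta; infer_instance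
def pvWitness_frequencia_absoluta : List Int × List (List Int) := ([3, 1, 4, 1, 5], [[0, 2], [2, 5], [5, 5]])

def Spec_frequencia_absoluta (dados : List Int) (classes : List (List Int)) (out : List Int) : Prop := out = frequencia_absoluta_alt dados classes
instance (dados : List Int) (classes : List (List Int)) (out : List Int) : Decidable (Spec_frequencia_absoluta dados classes out) := by unfold Spec_frequencia_absoluta; infer_instance

-- ===== CLAIM (what is proved, stated in full; the proofs are below) =====
def Claim_equal_frequencia_absoluta : Prop := ∀ (dados : List Int) (classes : List (List Int)), Dom_frequencia_absoluta dados classes → Pre_frequencia_absoluta dados classes → Spec_frequencia_absoluta dados classes (frequencia_absoluta dados classes)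

-- ===== LEMMAS AND PROOFS =====

-- countP is determined by a split point: everything before r satisfies p, nothing from r on does
theorem pv_countP_split {p : Int → Bool} : ∀ (s : List Int) (r : Nat), r ≤ s.length →
    (∀ i : Nat, (h : i < s.length) → i < r → p s[i]) →
    (∀ i : Nat, (h : i < s.length) → r ≤ i → ¬ p s[i]) →
    s.countP p = r := by
  intro s
  induction s with
  | nil => intro r hr _ _; simpa using (Nat.le_zero.mp hr).symm
  | cons x xs ih =>
    intro r hr h1 h2
    cases r with
    | zero =>
      have hx : p x = false := by simpa using h2 0 (by simp) (Nat.le_refl _)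
      have : xs.countP p = 0 := by
        apply ih 0 (Nat.zero_le _)
        · intro i h hlt; omega
        · intro i h _; exact h2 (i+1) (by simpa using Nat.succ_lt_succ h) (Nat.zero_le _)
      simp [List.countP_cons, this, hx]
    | succ r' =>
      have hx : p x := h1 0 (by simp) (Nat.succ_pos _)
      have : xs.countP p = r' := by
        apply ih r' (by simpa using Nat.succ_le_succ_iff.mp hr)
        · intro i h hlt; exact h1 (i+1) (by simpa using Nat.succ_lt_succ h) (Nat.succ_lt_succ hlt)
        · intro i h hge; exact h2 (i+1) (by simpa using Nat.succ_lt_succ h) (Nat.succ_le_succ hge)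
      simp [List.countP_cons, this, hx]

theorem pv_sorted_getElem_mono {s : List Int} (hs : s.Pairwise (· ≤ ·))
    {i j : Nat} (hij : i ≤ j) (hj : j < s.length) : s[i]'(by omega) ≤ s[j] := by
  rcases Nat.lt_or_ge i j with h | h
  · exact (List.pairwise_iff_getElem.mp hs) i j (by omega) hj h
  · have : i = j := by omega
    subst this; exact le_refl _

theorem pv_blLoop_eq (s : List Int) (t : Int) (hs : s.Pairwise (· ≤ ·)) :
    ∀ (lo hi : Int), 0 ≤ lo → lo ≤ hi → hi ≤ s.length →
    (∀ i : Nat, (h : i < s.length) → (i : Int) < lo → s[i] < t) →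
    (∀ i : Nat, (h : i < s.length) → hi ≤ (i : Int) → t ≤ s[i]) →
    pvBlLoop s t lo hi = (s.countP (fun x => decide (x < t)) : Int) := by
  intro lo hi
  induction lo, hi using pvBlLoop.induct s t with
  | case1 lo hi h mid hlt ih =>
    intro h0 hlohi hhi hbelow habove
    rw [pvBlLoop]
    have he : mid = (lo + hi) / 2 := PySem.Int.floordiv_eq_ediv_of_pos (by omega)
    have hmidb : lo ≤ mid ∧ mid < hi := by rw [he]; omega
    rw [dif_pos h, if_pos hlt]
    apply ih (by omega) (by omega) hhi
    · intro i hi' hilt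
      by_cases hcase : (i : Int) < lo
      · exact hbelow i hi' hcase
      · have h1 : i ≤ mid.toNat := by omega
        have h2 : mid.toNat < s.length := by omega
        have := pv_sorted_getElem_mono hs h1 h2
        have hm : PySem.List.pyGetD s mid 0 = s[mid.toNat] :=
          PySem.List.pyGetD_eq_getElem s 0 (by omega) (by omega)
        rw [hm] at hlt
        omega
    · exact habove
  | case2 lo hi h mid hlt ih =>
    intro h0 hlohi hhi hbelow habove
    rw [pvBlLoop]
    have he : mid = (lo + hi) / 2 := PySem.Int.floordiv_eq_ediv_of_pos (by omega)
    have hmidb : lo ≤ mid ∧ mid < hi := by rw [he]; omega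
    rw [dif_pos h, if_neg hlt]
    apply ih h0 (by omega) (by omega) hbelow
    · intro i hi' hige
      have h1 : mid.toNat ≤ i := by omega
      have := pv_sorted_getElem_mono hs h1 hi'
      have hm : PySem.List.pyGetD s mid 0 = s[mid.toNat] :=
        PySem.List.pyGetD_eq_getElem s 0 (by omega) (by omega)
      rw [hm] at hlt
      omega
  | case3 lo hi h =>
    intro h0 hlohi hhi hbelow habove
    rw [pvBlLoop, dif_neg h]
    have hle : lo = hi := by omega
    subst hle
    have : s.countP (fun x => decide (x < t)) = lo.toNat := by
      apply pv_countP_split s lo.toNat (by omega)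
      · intro i hi' hilt
        simpa using hbelow i hi' (by omega)
      · intro i hi' hige
        simpa using habove i hi' (by omega)
    omega

theorem pv_bisectLeft_eq (s : List Int) (t : Int) (hs : s.Pairwise (· ≤ ·)) :
    pvBisectLeft s t = (s.countP (fun x => decide (x < t)) : Int) := by
  unfold pvBisectLeft
  apply pv_blLoop_eq s t hs 0 (PySem.List.len s) (le_refl _) (by simp [PySem.List.len_eq])
    (by simp [PySem.List.len_eq])
  · intro i h hilt; omega
  · intro i h hge; simp [PySem.List.len_eq] at hge; omega

-- count of [lo,hi) as a difference of two "< bound" counts (lo ≤ hi)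
theorem pv_count_diff (lo hi : Int) (hlh : lo ≤ hi) : ∀ (l : List Int),
    l.countP (fun x => decide (x < hi)) =
      l.countP (fun x => decide (x < lo)) + l.countP (fun x => decide (lo ≤ x ∧ x < hi)) := by
  intro l
  induction l with
  | nil => simp
  | cons x xs ih =>
    simp only [List.countP_cons, ih, decide_eq_true_eq]
    split_ifs <;> omega

-- A's inner loop is a countP over dados
theorem pv_inner_eq (dados : List Int) (lo hi : Int) :
    (PySem.List.pyRange 0 (PySem.List.len dados) 1).foldl
      (fun count j =>
        if PySem.List.pyGetD dados j 0 ≥ lo ∧ PySem.List.pyGetD dados j 0 < hi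
        then count + 1 else count) (0 : Int)
    = (dados.countP (fun x => decide (lo ≤ x ∧ x < hi)) : Int) := by
  have h := PySem.List.foldl_pyRange_zero_pyGetD dados 0
    (fun (count : Int) (x : Int) => if x ≥ lo ∧ x < hi then count + 1 else count) 0
  rw [h]
  have h2 := PySem.List.foldl_count_if (fun x : Int => decide (lo ≤ x ∧ x < hi)) dados 0
  simp only [decide_eq_true_eq, zero_add] at h2
  rw [← h2]

-- per-class value of B equals per-class value of A
theorem pv_class_eq (dados : List Int) (c : List Int) :
    (if PySem.List.pyGetD c 0 0 < PySem.List.pyGetD c 1 0 then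
        pvBisectLeft (PySem.List.sorted dados (fun x => x) false) (PySem.List.pyGetD c 1 0) -
          pvBisectLeft (PySem.List.sorted dados (fun x => x) false) (PySem.List.pyGetD c 0 0)
      else 0)
    = (dados.countP (fun x => decide (PySem.List.pyGetD c 0 0 ≤ x ∧ x < PySem.List.pyGetD c 1 0)) : Int) := by
  set lo := PySem.List.pyGetD c 0 0
  set hi := PySem.List.pyGetD c 1 0
  set s := PySem.List.sorted dados (fun x => x) false with hsdef
  have hs : s.Pairwise (· ≤ ·) := PySem.List.sorted_pairwise dados (fun x => x)
  have hperm : s.Perm dados := PySem.List.sorted_perm dados (fun x => x) false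
  by_cases h : lo < hi
  · rw [if_pos h, pv_bisectLeft_eq s hi hs, pv_bisectLeft_eq s lo hs]
    have hd := pv_count_diff lo hi (le_of_lt h) s
    have hp : s.countP (fun x => decide (lo ≤ x ∧ x < hi)) = dados.countP (fun x => decide (lo ≤ x ∧ x < hi)) :=
      hperm.countP_eq _
    omega
  · rw [if_neg h]
    have : dados.countP (fun x => decide (lo ≤ x ∧ x < hi)) = 0 := by
      apply List.countP_eq_zero.mpr
      intro x _
      simp only [decide_eq_true_eq]
      omega
    omega

-- ===== VERDICT (by name: the statement is the Claim_ definition above) =====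
theorem frequencia_absoluta_spec : Claim_equal_frequencia_absoluta := by
  intro dados classes _ _
  unfold Spec_frequencia_absoluta frequencia_absoluta frequencia_absoluta_alt
  rw [PySem.List.foldl_pyRange_zero_pyGetD classes ([] : List Int)
    (fun (absoluta : List Int) (c : List Int) =>
      absoluta ++ [(PySem.List.pyRange 0 (PySem.List.len dados) 1).foldl
        (fun count j =>
          if PySem.List.pyGetD dados j 0 ≥ PySem.List.pyGetD c 0 0 ∧
             PySem.List.pyGetD dados j 0 < PySem.List.pyGetD c 1 0
          then count + 1 else count) 0]) []]
  rw [PySem.List.foldl_append_singleton_eq_map, PySem.List.foldl_append_singleton_eq_map]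
  simp only [List.nil_append]
  apply List.map_congr_left
  intro c _
  rw [pv_inner_eq dados (PySem.List.pyGetD c 0 0) (PySem.List.pyGetD c 1 0)]
  exact (pv_class_eq dados c).symm
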